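-- pv_equiv track=rewrite | github.com/Twip-Emma/twip-napcat-ws | Twip/user/user_info/payload/image_dao.py | find_coin_max
-- ===== SOURCE A (Python) =====
-- def find_coin_max(now_max: int) -> dict:
--     COIN_TABLE = {
--             100:100,
--             105:1000,
--             110:2000,
--             115:3000,
--             120:4000,
--             125:4500,
--             130:5000,
--             135:5500,
--             140:6000,
--             145:7000,
--             150:8000,
--             155:9000,
--             160:10000,
--             165:12500,
--             170:15000,
--             175:18000,
--             180:22000,
--             185:28000,
--             190:40000,
--             195:60000,
--             200:100000,
--             205:120000,
--             210:140000,
--             215:160000,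
--             220:180000,
--             225:200000,
--             230:220000,
--             235:240000,
--             240:260000,
--             245:280000,
--             250:300000,
--             255:9999999
--         }
--     now_level = 1
--     level_up = 50
--     for item in COIN_TABLE.items():
--         if item[0] == now_max:
--             level_up = item[1]
--             break
--         now_level += 1
--
--     p = now_level
--     next_coin_max = None
--     for item in COIN_TABLE.items():
--         if p == 0:
--             next_coin_max = item[0]
--             break
--         p -= 1
--
--     return {
--         "now_level":now_level,
--         "max_level":len(COIN_TABLE),
--         "level_up":level_up,
--         "next_coin_max":next_coin_max
--     }
-- ===== SOURCE B (Python) =====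
-- # Closed-form lookup: keys are the arithmetic progression 100,105,...,255, so the
-- # level index is computed arithmetically and the level-up value read from a tuple.
-- _LEVEL_UP = (100, 1000, 2000, 3000, 4000, 4500, 5000, 5500, 6000, 7000,
--              8000, 9000, 10000, 12500, 15000, 18000, 22000, 28000, 40000,
--              60000, 100000, 120000, 140000, 160000, 180000, 200000, 220000,
--              240000, 260000, 280000, 300000, 9999999)
--
-- def find_coin_max(now_max: int) -> dict:
--     if 100 <= now_max <= 255 and now_max % 5 == 0:
--         i = (now_max - 100) // 5
--         return {
--             "now_level": i + 1,
--             "max_level": 32,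
--             "level_up": _LEVEL_UP[i],
--             "next_coin_max": 100 + 5 * (i + 1) if i < 31 else None,
--         }
--     return {"now_level": 33, "max_level": 32, "level_up": 50, "next_coin_max": None}
-- ===== Notes on version B (the rewrite author's own statement) =====
-- stated objective: simpler
-- what changed: The two sequential scan loops over the coin table are replaced by a closed-form membership test (100 <= now_max <= 255 and now_max % 5 == 0) with arithmetic index computation and a direct tuple lookup; no loop remains.
import Mathlib
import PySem

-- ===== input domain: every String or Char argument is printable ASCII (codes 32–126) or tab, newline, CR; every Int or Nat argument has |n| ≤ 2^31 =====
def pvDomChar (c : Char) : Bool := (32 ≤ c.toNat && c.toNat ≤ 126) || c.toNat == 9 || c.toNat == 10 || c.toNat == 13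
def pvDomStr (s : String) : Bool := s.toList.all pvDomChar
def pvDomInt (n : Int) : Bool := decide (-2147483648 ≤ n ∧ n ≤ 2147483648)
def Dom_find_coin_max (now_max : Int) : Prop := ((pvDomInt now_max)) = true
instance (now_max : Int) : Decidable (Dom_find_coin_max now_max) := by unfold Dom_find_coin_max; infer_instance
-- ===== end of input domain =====

-- B replaces A's two scans of the 32-entry table by a closed-form arithmetic index
-- computation and a direct list lookup (objective: simpler).


-- ===== PORT A =====
-- COIN_TABLE.items() in insertion order
def pvCoinTable : List (Int × Int) :=
  [(100,100),(105,1000),(110,2000),(115,3000),(120,4000),(125,4500),(130,5000),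
   (135,5500),(140,6000),(145,7000),(150,8000),(155,9000),(160,10000),(165,12500),
   (170,15000),(175,18000),(180,22000),(185,28000),(190,40000),(195,60000),
   (200,100000),(205,120000),(210,140000),(215,160000),(220,180000),(225,200000),
   (230,220000),(235,240000),(240,260000),(245,280000),(250,300000),(255,9999999)]

-- first loop: now_level starts at lvl, level_up starts at 50; break on key match
def pvLoop1 (now_max : Int) : List (Int × Int) → Int → Int × Int
  | [], lvl => (lvl, 50)
  | (k, v) :: rest, lvl => if k = now_max then (lvl, v) else pvLoop1 now_max rest (lvl + 1)

-- second loop: p counts down; break with item[0] when p == 0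
def pvLoop2 : Int → List (Int × Int) → Option Int
  | _, [] => none
  | p, (k, _) :: rest => if p = 0 then some k else pvLoop2 (p - 1) rest

def find_coin_max (now_max : Int) : List (String × Option Int) :=
  let r := pvLoop1 now_max pvCoinTable 1
  let next_coin_max := pvLoop2 r.1 pvCoinTable
  [("now_level", some r.1), ("max_level", some (pvCoinTable.length : Int)),
   ("level_up", some r.2), ("next_coin_max", next_coin_max)]

-- ===== PORT B =====
def pvLevelUp : List Int :=
  [100, 1000, 2000, 3000, 4000, 4500, 5000, 5500, 6000, 7000, 8000, 9000, 10000,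
   12500, 15000, 18000, 22000, 28000, 40000, 60000, 100000, 120000, 140000,
   160000, 180000, 200000, 220000, 240000, 260000, 280000, 300000, 9999999]

def find_coin_max_alt (now_max : Int) : List (String × Option Int) :=
  if 100 ≤ now_max ∧ now_max ≤ 255 ∧ PySem.Int.mod now_max 5 = 0 then
    let i := PySem.Int.floordiv (now_max - 100) 5
    -- _LEVEL_UP[i] : i is provably in range under the branch condition, default never used
    [("now_level", some (i + 1)), ("max_level", some 32),
     ("level_up", some (PySem.List.pyGetD pvLevelUp i 0)),
     ("next_coin_max", if i < 31 then some (100 + 5 * (i + 1)) else none)]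
  else
    [("now_level", some 33), ("max_level", some 32), ("level_up", some 50),
     ("next_coin_max", none)]

-- ===== PRECONDITION & SPEC =====
def Spec_find_coin_max (now_max : Int) (out : List (String × Option Int)) : Prop := out = find_coin_max_alt now_max
instance (now_max : Int) (out : List (String × Option Int)) : Decidable (Spec_find_coin_max now_max out) := by unfold Spec_find_coin_max; infer_instance

-- ===== CLAIM (what is proved, stated in full; the proofs are below) =====
def Claim_equal_find_coin_max : Prop := ∀ (now_max : Int), Dom_find_coin_max now_max → Spec_find_coin_max now_max (find_coin_max now_max)

-- ===== LEMMAS AND PROOFS =====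

-- when now_max matches no key, the first loop walks the whole table
theorem pvLoop1_miss (now_max : Int) (t : List (Int × Int)) (lvl : Int)
    (h : ∀ kv ∈ t, kv.1 ≠ now_max) :
    pvLoop1 now_max t lvl = (lvl + t.length, 50) := by
  induction t generalizing lvl with
  | nil => simp [pvLoop1]
  | cons kv rest ih =>
    obtain ⟨k, v⟩ := kv
    have hk : k ≠ now_max := h (k, v) (by simp)
    simp only [pvLoop1, if_neg hk]
    rw [ih (lvl + 1) (fun kv hm => h kv (List.mem_cons_of_mem _ hm))]
    simp; ring

-- ===== VERDICT (by name: the statement is the Claim_ definition above) =====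
theorem find_coin_max_spec : Claim_equal_find_coin_max := by
  intro x _
  unfold Spec_find_coin_max
  by_cases h : 100 ≤ x ∧ x ≤ 255 ∧ PySem.Int.mod x 5 = 0
  · obtain ⟨h1, h2, h3⟩ := h
    rw [PySem.Int.mod_eq_emod_of_pos (by norm_num : (0:Int) < 5)] at h3
    have : x = 100 ∨ x = 105 ∨ x = 110 ∨ x = 115 ∨ x = 120 ∨ x = 125 ∨ x = 130 ∨
        x = 135 ∨ x = 140 ∨ x = 145 ∨ x = 150 ∨ x = 155 ∨ x = 160 ∨ x = 165 ∨
        x = 170 ∨ x = 175 ∨ x = 180 ∨ x = 185 ∨ x = 190 ∨ x = 195 ∨ x = 200 ∨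
        x = 205 ∨ x = 210 ∨ x = 215 ∨ x = 220 ∨ x = 225 ∨ x = 230 ∨ x = 235 ∨
        x = 240 ∨ x = 245 ∨ x = 250 ∨ x = 255 := by omega
    rcases this with h | h | h | h | h | h | h | h | h | h | h | h | h | h | h | h |
      h | h | h | h | h | h | h | h | h | h | h | h | h | h | h | h <;> subst h <;> decide
  · have hne : ∀ kv ∈ pvCoinTable, kv.1 ≠ x := by
      intro kv hm heq
      apply h
      fin_cases hm <;> simp_all <;> omega
    unfold find_coin_max
    rw [pvLoop1_miss x pvCoinTable 1 hne]
    unfold find_coin_max_alt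
    rw [if_neg h]
    decide
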